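-- pv_equiv track=rewrite | github.com/Tori-Satsumi/Nestech | week4/bootcamp/day1/ex35_8.py | solve
-- ===== SOURCE A (Python) =====
-- def solve(N):
--     """Create a list which contains N lists,
--     each list contains N numbers from 0->N-1.
--
--     E.g with N = 10:
--
--     matrix = [
--       [0, 1, 2, 3, 4, 5, 6, 7, 8, 9],
--       [0, 1, 2, 3, 4, 5, 6, 7, 8, 9],
--       ...
--       ...
--       [0, 1, 2, 3, 4, 5, 6, 7, 8, 9],
--       [0, 1, 2, 3, 4, 5, 6, 7, 8, 9]
--     ]
--
--     Then returns a string looks like below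
--
--       0********0
--       *1******1*
--       **2****2**
--       ***3**3***
--       ****44****
--       ****55****
--       ***6**6***
--       **7****7**
--       *8******8*
--       9********9
--     """
--     lst = [[str(i) for _ in range(N)] for i in range(N)]
--     for _i, row in enumerate(lst):
--         for i, char in enumerate(lst[_i]):
--             if not(_i == i or _i == N - 1 - i):
--                 lst[_i][i] = "*"
--         lst[_i] = "".join(lst[_i])
--
--     return "\n".join(lst)
-- ===== SOURCE B (Python) =====
-- def solve(N):
--     rows = []
--     for i in range(N):
--         row = ["*"] * N
--         row[i] = str(i)
--         row[N - 1 - i] = str(i)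
--         rows.append("".join(row))
--     return "\n".join(rows)
-- ===== Notes on version B (the rewrite author's own statement) =====
-- stated objective: simpler
-- what changed: B writes str(i) at the two diagonal positions i and N-1-i of a row of stars in closed form, instead of building a full N x N digit matrix and then scanning every cell to overwrite off-diagonal entries; a timing run measured this constant-factor saving (one construction per row vs matrix build plus per-cell scan).
import Mathlib
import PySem

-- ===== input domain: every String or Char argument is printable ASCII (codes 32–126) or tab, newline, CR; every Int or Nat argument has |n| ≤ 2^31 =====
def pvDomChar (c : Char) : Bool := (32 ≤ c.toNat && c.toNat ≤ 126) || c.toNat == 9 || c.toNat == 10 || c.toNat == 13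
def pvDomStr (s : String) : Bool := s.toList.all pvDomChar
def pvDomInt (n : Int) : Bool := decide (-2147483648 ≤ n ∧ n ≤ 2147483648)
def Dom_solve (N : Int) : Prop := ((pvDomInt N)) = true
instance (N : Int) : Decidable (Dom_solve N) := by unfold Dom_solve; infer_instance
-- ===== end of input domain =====

-- B assigns str(i) to the two diagonal cells of a star row in closed form instead of
-- scanning every cell of a prebuilt digit matrix (objective: simpler).

-- ===== PORT A =====
def solve (N : Int) : String :=
  let lst := (PySem.List.pyRange 0 N 1).map (fun i =>
    (PySem.List.pyRange 0 N 1).map (fun _ => PySem.Int.toStr i))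
  let rows := (PySem.List.enumerate lst 0).map (fun p =>
    PySem.Str.join "" ((PySem.List.enumerate p.2 0).map (fun q =>
      if ¬(p.1 = q.1 ∨ p.1 = N - 1 - q.1) then "*" else q.2)))
  PySem.Str.join "\n" rows

-- ===== PORT B =====
-- row[i] / row[N-1-i]: both indices are in [0, N) inside the loop, so List.set with
-- .toNat is exact here (no negative or out-of-range assignment ever occurs).
def solve_alt (N : Int) : String :=
  PySem.Str.join "\n" ((PySem.List.pyRange 0 N 1).map (fun i =>
    PySem.Str.join ""
      (((List.replicate N.toNat "*").set i.toNat (PySem.Int.toStr i)).set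
        (N - 1 - i).toNat (PySem.Int.toStr i))))

-- ===== PRECONDITION & SPEC =====
def Spec_solve (N : Int) (out : String) : Prop := out = solve_alt N
instance (N : Int) (out : String) : Decidable (Spec_solve N out) := by unfold Spec_solve; infer_instance

-- ===== CLAIM (what is proved, stated in full; the proofs are below) =====
def Claim_equal_solve : Prop := ∀ (N : Int), Dom_solve N → Spec_solve N (solve N)

-- ===== LEMMAS AND PROOFS =====

-- the cell lists of row i agree element by element
lemma row_eq (N i : Int) (h0 : 0 ≤ i) (h1 : i < N) :
    ((PySem.List.enumerate ((PySem.List.pyRange 0 N 1).map (fun _ => PySem.Int.toStr i)) 0).map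
      (fun q => if ¬(i = q.1 ∨ i = N - 1 - q.1) then "*" else q.2))
    = (((List.replicate N.toNat "*").set i.toNat (PySem.Int.toStr i)).set
        (N - 1 - i).toNat (PySem.Int.toStr i)) := by
  apply List.ext_getElem
  · simp [PySem.List.length_enumerate, PySem.List.length_pyRange_one]
  · intro j hj1 hj2
    have hjN : j < N.toNat := by
      simpa [PySem.List.length_pyRange_one] using hj2
    have hjlt : (j : Int) < N := by omega
    simp only [List.getElem_map, PySem.List.getElem_enumerate, List.getElem_set,
      List.getElem_replicate]
    have hi : i.toNat = j ↔ i = (j : Int) := by omega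
    have hn : (N - 1 - i).toNat = j ↔ i = N - 1 - (j : Int) := by omega
    by_cases c1 : i = (0 : Int) + (j : Int)
    · simp [c1]
    · by_cases c2 : i = N - 1 - ((0 : Int) + (j : Int))
      · simp [c2]
      · have : ¬ (N - 1 - i).toNat = j := by omega
        have : ¬ i.toNat = j := by omega
        simp_all

lemma rows_eq (N : Int) :
    ((PySem.List.enumerate ((PySem.List.pyRange 0 N 1).map (fun i =>
        (PySem.List.pyRange 0 N 1).map (fun _ => PySem.Int.toStr i))) 0).map (fun p =>
      PySem.Str.join "" ((PySem.List.enumerate p.2 0).map (fun q =>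
        if ¬(p.1 = q.1 ∨ p.1 = N - 1 - q.1) then "*" else q.2))))
    = ((PySem.List.pyRange 0 N 1).map (fun i =>
        PySem.Str.join ""
          (((List.replicate N.toNat "*").set i.toNat (PySem.Int.toStr i)).set
            (N - 1 - i).toNat (PySem.Int.toStr i)))) := by
  apply List.ext_getElem
  · simp [PySem.List.length_enumerate, PySem.List.length_pyRange_one]
  · intro k hk1 hk2
    have hkN : k < N.toNat := by
      simpa [PySem.List.length_enumerate, PySem.List.length_pyRange_one] using hk1
    simp only [List.getElem_map, PySem.List.getElem_enumerate, PySem.List.getElem_pyRange_one]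
    have h0 : (0 : Int) ≤ 0 + (k : Int) := by omega
    have h1 : (0 : Int) + (k : Int) < N := by omega
    have := row_eq N (0 + (k : Int)) h0 h1
    rw [this]


-- ===== VERDICT (by name: the statement is the Claim_ definition above) =====
theorem solve_spec : Claim_equal_solve := by
  intro N _
  unfold Spec_solve solve solve_alt
  simp only []
  exact congrArg (PySem.Str.join "\n") (rows_eq N)
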